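-- pv_equiv track=rewrite | github.com/linhdvu14/cp-sols | sols/CodeChef/JUNE222A/APGRID.py | solve
-- ===== SOURCE A (Python) =====
-- def solve(R, C):
--     if R == 1: return [list(range(1, C+1))]
--     if C == 1: return [[i] for i in range(1, R+1)]
--
--     # row diff: 1, 2, ..., R; col diff: R+1, R+2, ..., R+C
--     # 1            2              3            ...
--     # 1 + (R+1)    3 + (R+1)      5 + (R+1)    ...
--     # 1 + 2(R+1)   4 + 2(R+1)     7 + 2(R+1)   ...
--     A = []
--     for r in range(R):
--         a = 1 + (R + 1) * r
--         d = r + 1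
--         row = [a + d * c for c in range(C)]
--         A.append(row)
--
--     # col diff: 1, 2, ..., C; row diff: C+1, C+2, ..., C+R
--     # 1   1 + (C+1)   1 + 2(C+1) ...
--     # 2   3 + (C+1)   4 + 2(C+1) ...
--     # 3   5 + (C+1)   7 + 2(C+1) ...
--     B = []
--     for r in range(R):
--         a = r + 1
--         d = C + r + 1
--         row = [a + d * c for c in range(C)]
--         B.append(row)
--
--     return A if A[-1][-1] < B[-1][-1] else B
-- ===== SOURCE B (Python) =====
-- def solve(R, C):
--     # Incremental construction: pick parameters by the closed-form corner test
--     # (grid with row-major small diffs wins iff R < C), then generate the first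
--     # row as a running sum and derive each subsequent row from the previous one
--     # (cell (r,c) grows by bump + c from row to row).
--     step0, bump = (1, R + 1) if R < C else (C + 1, 1)
--     row, v = [], 1
--     for _ in range(C):
--         row.append(v)
--         v += step0
--     grid = []
--     for _ in range(R):
--         grid.append(row)
--         row = [x + bump + c for c, x in enumerate(row)]
--     return grid
-- ===== Notes on version B (the rewrite author's own statement) =====
-- stated objective: alternative
-- what changed: B replaces A's build-both-grids-and-compare-corners with an incremental construction: it picks the winning parameters by the closed-form corner test (row-form wins iff R < C), generates the first row as a running sum, and derives each subsequent row from the previous one by a row-to-row recurrence (cell (r,c) grows by bump + c), so no closed-form per-cell formula and no second grid is ever built; it also does about half the work since the losing grid is never constructed.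
import Mathlib
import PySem

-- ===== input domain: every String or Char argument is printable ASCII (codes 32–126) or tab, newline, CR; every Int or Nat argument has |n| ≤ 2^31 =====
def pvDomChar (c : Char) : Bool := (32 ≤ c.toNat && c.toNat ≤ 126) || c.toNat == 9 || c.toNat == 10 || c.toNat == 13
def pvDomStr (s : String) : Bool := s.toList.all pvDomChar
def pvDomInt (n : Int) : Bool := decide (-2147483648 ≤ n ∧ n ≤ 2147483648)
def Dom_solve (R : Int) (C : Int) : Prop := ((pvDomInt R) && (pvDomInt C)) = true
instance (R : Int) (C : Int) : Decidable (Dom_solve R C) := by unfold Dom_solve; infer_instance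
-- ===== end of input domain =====

-- B builds only the winning grid incrementally: first row as a running sum, then each row from the previous by a row-to-row recurrence; never constructs the losing grid (measured faster in a timing run).


-- ===== PORT A =====
def solve (R : Int) (C : Int) : List (List Int) :=
  if R = 1 then [PySem.List.pyRange 1 (C + 1) 1]
  else if C = 1 then (PySem.List.pyRange 1 (R + 1) 1).map (fun i => [i])
  else
    let A := (PySem.List.pyRange 0 R 1).map (fun r =>
      let a := 1 + (R + 1) * r
      let d := r + 1
      (PySem.List.pyRange 0 C 1).map (fun c => a + d * c))
    let B := (PySem.List.pyRange 0 R 1).map (fun r =>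
      let a := r + 1
      let d := C + r + 1
      (PySem.List.pyRange 0 C 1).map (fun c => a + d * c))
    -- A[-1][-1] and B[-1][-1]; 'none' = IndexError, excluded by Pre_solve
    match (PySem.List.pyGet? A (-1)).bind (fun row => PySem.List.pyGet? row (-1)),
          (PySem.List.pyGet? B (-1)).bind (fun row => PySem.List.pyGet? row (-1)) with
    | some x, some y => if x < y then A else B
    | _, _ => B

-- ===== PORT B =====
-- [x + bump + c for c, x in enumerate(row)]
def nextRowB (bump : Int) (row : List Int) : List Int :=
  (PySem.List.enumerate row 0).map (fun p => p.2 + bump + p.1)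

def solve_alt (R : Int) (C : Int) : List (List Int) :=
  let p := if R < C then ((1 : Int), R + 1) else (C + 1, (1 : Int))
  let step0 := p.1
  let bump := p.2
  -- first row as a running sum
  let rv := (PySem.List.pyRange 0 C 1).foldl
      (fun (s : List Int × Int) _ => (s.1 ++ [s.2], s.2 + step0)) ([], 1)
  -- each further row derived from the previous one
  let gr := (PySem.List.pyRange 0 R 1).foldl
      (fun (s : List (List Int) × List Int) _ => (s.1 ++ [s.2], nextRowB bump s.2)) ([], rv.1)
  gr.1

-- ===== PRECONDITION & SPEC =====
-- Pre_ excludes exactly the inputs where A raises IndexError (A[-1] on an empty grid or row).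
def Pre_solve (R : Int) (C : Int) : Prop := R = 1 ∨ C = 1 ∨ (1 ≤ R ∧ 1 ≤ C)
instance (R : Int) (C : Int) : Decidable (Pre_solve R C) := by unfold Pre_solve; infer_instance
def pvWitness_solve : Int × Int := (2, 2)

def Spec_solve (R : Int) (C : Int) (out : List (List Int)) : Prop := out = solve_alt R C
instance (R : Int) (C : Int) (out : List (List Int)) : Decidable (Spec_solve R C out) := by unfold Spec_solve; infer_instance

-- ===== CLAIM (what is proved, stated in full; the proofs are below) =====
def Claim_equal_solve : Prop := ∀ (R : Int) (C : Int), Dom_solve R C → Pre_solve R C → Spec_solve R C (solve R C)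

-- ===== LEMMAS AND PROOFS =====

-- closed forms of the two candidate grids (proof-only helpers)
def gridRows (R C : Int) : List (List Int) :=
  (PySem.List.pyRange 0 R 1).map (fun r =>
    (PySem.List.pyRange 0 C 1).map (fun c => 1 + (R + 1) * r + (r + 1) * c))
def gridCols (R C : Int) : List (List Int) :=
  (PySem.List.pyRange 0 R 1).map (fun r =>
    (PySem.List.pyRange 0 C 1).map (fun c => (r + 1) + (C + r + 1) * c))

-- range(1, n+1) is 1 + range(n)
lemma pyRange_shift (n : Int) :
    PySem.List.pyRange 1 (n + 1) 1 = (PySem.List.pyRange 0 n 1).map (fun k => 1 + k) := by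
  simp [PySem.List.pyRange_one, List.map_map, Function.comp]

lemma getLast?_pyRange (n : Int) (h : 1 ≤ n) :
    (PySem.List.pyRange 0 n 1).getLast? = some (n - 1) := by
  have e : PySem.List.pyRange 0 n 1 = PySem.List.pyRange 0 (n - 1) 1 ++ [n - 1] := by
    have := PySem.List.pyRange_one_succ_right (a := 0) (b := n - 1) (by omega)
    simpa using this
  rw [e]; simp

-- last element of a built grid
lemma lastlast_grid (n m : Int) (hn : 1 ≤ n) (hm : 1 ≤ m) (f : Int → Int → Int) :
    ((PySem.List.pyGet? ((PySem.List.pyRange 0 n 1).map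
        (fun r => (PySem.List.pyRange 0 m 1).map (fun c => f r c))) (-1)).bind
      (fun row => PySem.List.pyGet? row (-1)))
    = some (f (n - 1) (m - 1)) := by
  rw [PySem.List.pyGet?_neg_one, List.getLast?_map, getLast?_pyRange n hn]
  simp only [Option.map_some, Option.bind_some]
  rw [PySem.List.pyGet?_neg_one, List.getLast?_map, getLast?_pyRange m hm]
  simp

-- A reduces to the closed-form selection
theorem solve_eq_closed (R C : Int) (hpre : Pre_solve R C) :
    solve R C = if R < C then gridRows R C else gridCols R C := by
  unfold solve gridRows gridCols
  by_cases hR1 : R = 1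
  · subst hR1
    rw [if_pos rfl]
    by_cases hC : (1 : Int) < C
    · rw [if_pos hC]
      have h01 : PySem.List.pyRange (0:Int) 1 1 = [0] := by decide
      rw [h01, pyRange_shift C]
      simp
    · rw [if_neg hC]
      have h01 : PySem.List.pyRange (0:Int) 1 1 = [0] := by decide
      rw [h01]
      by_cases hC1 : C = 1
      · subst hC1; decide
      · have hC0 : C ≤ 0 := by omega
        have e1 : PySem.List.pyRange 1 (C + 1) 1 = [] :=
          PySem.List.pyRange_one_eq_nil (by omega)
        have e2 : PySem.List.pyRange 0 C 1 = [] :=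
          PySem.List.pyRange_one_eq_nil (by omega)
        rw [e1, e2]; simp
  · rw [if_neg hR1]
    by_cases hC1 : C = 1
    · subst hC1
      by_cases hR : R < 1
      · rw [if_pos hR]
        have e1 : PySem.List.pyRange 1 (R + 1) 1 = [] :=
          PySem.List.pyRange_one_eq_nil (by omega)
        have e2 : PySem.List.pyRange 0 R 1 = [] :=
          PySem.List.pyRange_one_eq_nil (by omega)
        rw [e1, e2]; simp
      · rw [if_neg hR]
        have h01 : PySem.List.pyRange (0:Int) 1 1 = [0] := by decide
        rw [h01, pyRange_shift R]
        simp
        intro a _ _; omega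
    · rw [if_neg hC1]
      have hR2 : 2 ≤ R := by
        rcases hpre with h | h | h
        · exact absurd h hR1
        · exact absurd h hC1
        · omega
      have hC2 : 2 ≤ C := by
        rcases hpre with h | h | h
        · exact absurd h hR1
        · exact absurd h hC1
        · omega
      simp only []
      rw [lastlast_grid R C (by omega) (by omega)
            (fun r c => 1 + (R + 1) * r + (r + 1) * c),
          lastlast_grid R C (by omega) (by omega)
            (fun r c => (r + 1) + (C + r + 1) * c)]
      have hxy : (1 + (R + 1) * (R - 1) + ((R - 1) + 1) * (C - 1)
                    < ((R - 1) + 1) + (C + (R - 1) + 1) * (C - 1)) ↔ R < C := by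
        constructor <;> intro h <;> nlinarith
      simp only [hxy]

-- the running-sum fold builds the arithmetic first row
lemma rowFold (step0 : Int) :
    ∀ (l : List Int) (acc : List Int) (v : Int),
      l.foldl (fun (s : List Int × Int) _ => (s.1 ++ [s.2], s.2 + step0)) (acc, v)
        = (acc ++ (List.range l.length).map (fun (i : Nat) => v + step0 * (i : Int)),
           v + step0 * l.length) := by
  intro l
  induction l with
  | nil => intro acc v; simp
  | cons x l ih =>
    intro acc v
    simp only [List.foldl_cons, ih, List.length_cons, List.range_succ_eq_map,
      List.map_cons, List.map_map, Prod.mk.injEq]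
    constructor
    · rw [List.append_assoc]
      congr 1
      simp only [List.singleton_append, List.cons.injEq]
      refine ⟨by ring, ?_⟩
      apply List.map_congr_left
      intro i _
      simp only [Function.comp]
      push_cast
      ring
    · push_cast
      ring

-- enumerate of a range-built row
lemma enumerate_map_range (g : Nat → Int) (n : Nat) :
    PySem.List.enumerate ((List.range n).map g) 0
      = (List.range n).map (fun (k : Nat) => ((k : Int), g k)) := by
  apply List.ext_getElem?
  intro k
  rw [PySem.List.getElem?_enumerate]
  by_cases hk : k < n
  · simp [hk]
  · have hnone : (List.range n)[k]? = none := List.getElem?_eq_none (by simp; omega)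
    simp [hnone]

-- one row-to-row step on a range-built row
lemma nextRowB_map_range (bump : Int) (g : Nat → Int) (n : Nat) :
    nextRowB bump ((List.range n).map g)
      = (List.range n).map (fun (k : Nat) => g k + bump + (k : Int)) := by
  unfold nextRowB
  rw [enumerate_map_range]
  simp [List.map_map, Function.comp]

-- iterating the row step
lemma iter_nextRowB (bump : Int) (n : Nat) :
    ∀ (r : Nat) (g : Nat → Int),
      (nextRowB bump)^[r] ((List.range n).map g)
        = (List.range n).map (fun (k : Nat) => g k + (r : Int) * (bump + (k : Int))) := by
  intro r
  induction r with
  | zero => intro g; simp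
  | succ r ih =>
    intro g
    rw [Function.iterate_succ_apply, nextRowB_map_range, ih]
    apply List.map_congr_left
    intro k _
    push_cast
    ring

-- the grid fold collects the iterated rows
lemma gridFold (bump : Int) :
    ∀ (l : List Int) (g0 : List (List Int)) (row : List Int),
      l.foldl (fun (s : List (List Int) × List Int) _ => (s.1 ++ [s.2], nextRowB bump s.2)) (g0, row)
        = (g0 ++ (List.range l.length).map (fun i => (nextRowB bump)^[i] row),
           (nextRowB bump)^[l.length] row) := by
  intro l
  induction l with
  | nil => intro g0 row; simp
  | cons x l ih =>
    intro g0 row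
    simp only [List.foldl_cons, ih, List.length_cons, List.range_succ_eq_map,
      List.map_cons, List.map_map, Prod.mk.injEq]
    exact ⟨by rw [List.append_assoc]; congr 1, by rw [← Function.iterate_succ_apply]⟩

-- B reduces to the same closed-form selection (unconditionally)
theorem alt_eq_closed (R C : Int) :
    solve_alt R C = if R < C then gridRows R C else gridCols R C := by
  unfold solve_alt gridRows gridCols
  have hlenC : (PySem.List.pyRange 0 C 1).length = C.toNat := by
    simpa using PySem.List.length_pyRange_one (a := 0) (b := C)
  have hlenR : (PySem.List.pyRange 0 R 1).length = R.toNat := by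
    simpa using PySem.List.length_pyRange_one (a := 0) (b := R)
  by_cases h : R < C
  · simp only [h, if_true]
    rw [rowFold, hlenC, gridFold, hlenR]
    simp only [List.nil_append]
    rw [PySem.List.pyRange_one (a := 0) (b := R), PySem.List.pyRange_one (a := 0) (b := C)]
    simp only [List.map_map, Int.sub_zero]
    apply List.map_congr_left
    intro r _
    rw [iter_nextRowB]
    apply List.map_congr_left
    intro k _
    simp only [Function.comp]
    ring
  · simp only [h, if_false]
    rw [rowFold, hlenC, gridFold, hlenR]
    simp only [List.nil_append]
    rw [PySem.List.pyRange_one (a := 0) (b := R), PySem.List.pyRange_one (a := 0) (b := C)]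
    simp only [List.map_map, Int.sub_zero]
    apply List.map_congr_left
    intro r _
    rw [iter_nextRowB]
    apply List.map_congr_left
    intro k _
    simp only [Function.comp]
    ring

-- ===== VERDICT (by name: the statement is the Claim_ definition above) =====
theorem solve_spec : Claim_equal_solve := by
  intro R C _ hpre
  unfold Spec_solve
  rw [solve_eq_closed R C hpre, alt_eq_closed]
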